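-- pv_equiv track=rewrite | github.com/alumnos-ingcom/C2-TP5-grupo-3 | tp5ej8.py | mover_abecedario
-- ===== SOURCE A (Python) =====
-- def mover_abecedario(N):
--     '''
--     A partir de un parametro N, se retorna un String con un abecedario inglés en minusculas (no incluye la 'ñ') desplazado N espacios.
--     -si N < 0 ==> en la posicion de una letra se encontrará la letra N espacios a la izquierda de esta.
--     -si N > 0 ==> en la posicion de una letra se encontrará la letra N espacios a la derecha de esta.
--     '''
--     #creo un String que contendrá el abecedario movido N espacios
--     abecedario_movido = ""
--
--     #valores de los ASCII utiles para los for que siguen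
--     a = ord('a')
--     z = ord('z') + 1
--     letras = z - a
--
--     if(N >= 0):
--         #el valor N quedará acotado entre 0 y 25
--         N = N % letras
--         #agrego al abecedario desde la N-esima letra hasta la 'z'.
--         for i in range(a + N , z):
--             abecedario_movido += chr(i)
--         #agrego al abecedario desde la 'a' hasta la N-esima letra.
--         for i in range(a , a + N):
--             abecedario_movido += chr(i)
--     else:
--         #el valor N quedará acotado entre -25 y 0
--         N = N % -letras
--         #agrego al abecedario desde la N-esima letra hasta la 'z'.
--         for i in range(z + N, z):
--             abecedario_movido += chr(i)
--         #agrego al abecedario desde la 'a' hasta la N-esima letra.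
--         for i in range(a , z + N):
--             abecedario_movido += chr(i)
--
--     return abecedario_movido
-- ===== SOURCE B (Python) =====
-- def mover_abecedario(N):
--     # Branchless: each output position i holds chr(ord('a') + (i + N) % 26).
--     return ''.join(chr(97 + (i + N) % 26) for i in range(26))
-- ===== Notes on version B (the rewrite author's own statement) =====
-- stated objective: simpler
-- what changed: Replaces the sign-split two-block concatenation (suffix range then prefix range, with separate N%26 / N%-26 normalisation per branch) by a single branchless per-position modular map chr(97+(i+N)%26) over range(26).
import Mathlib
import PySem

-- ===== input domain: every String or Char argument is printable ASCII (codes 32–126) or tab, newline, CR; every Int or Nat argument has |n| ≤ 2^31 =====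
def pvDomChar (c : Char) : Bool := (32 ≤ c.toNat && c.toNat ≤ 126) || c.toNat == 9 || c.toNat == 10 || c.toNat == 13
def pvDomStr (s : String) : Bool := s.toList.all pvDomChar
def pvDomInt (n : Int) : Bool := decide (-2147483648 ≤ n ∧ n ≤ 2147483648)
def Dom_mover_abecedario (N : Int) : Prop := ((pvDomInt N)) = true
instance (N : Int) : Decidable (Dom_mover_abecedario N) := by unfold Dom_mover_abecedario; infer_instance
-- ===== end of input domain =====

-- B replaces A's sign-split two-block concatenation by one branchless per-position modular map.

-- ===== PORT A =====
-- chr(i) is ported as Char.ofNat i.toNat: exact here since every i in the ranges is 97..122.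
def mover_abecedario (N : Int) : String :=
  let acc : List Char := []
  let a : Int := 97
  let z : Int := 122 + 1
  let letras : Int := z - a
  if N ≥ 0 then
    let N' := PySem.Int.mod N letras
    let acc := (PySem.List.pyRange (a + N') z 1).foldl (fun s i => s ++ [Char.ofNat i.toNat]) acc
    let acc := (PySem.List.pyRange a (a + N') 1).foldl (fun s i => s ++ [Char.ofNat i.toNat]) acc
    String.ofList acc
  else
    let N' := PySem.Int.mod N (-letras)
    let acc := (PySem.List.pyRange (z + N') z 1).foldl (fun s i => s ++ [Char.ofNat i.toNat]) acc
    let acc := (PySem.List.pyRange a (z + N') 1).foldl (fun s i => s ++ [Char.ofNat i.toNat]) acc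
    String.ofList acc

-- ===== PORT B =====
def mover_abecedario_alt (N : Int) : String :=
  String.ofList ((List.range 26).map (fun i => Char.ofNat (97 + PySem.Int.mod ((i : Int) + N) 26).toNat))

-- ===== PRECONDITION & SPEC =====
def Spec_mover_abecedario (N : Int) (out : String) : Prop := out = mover_abecedario_alt N
instance (N : Int) (out : String) : Decidable (Spec_mover_abecedario N out) := by unfold Spec_mover_abecedario; infer_instance

-- ===== CLAIM (what is proved, stated in full; the proofs are below) =====
def Claim_equal_mover_abecedario : Prop := ∀ (N : Int), Dom_mover_abecedario N → Spec_mover_abecedario N (mover_abecedario N)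

-- ===== LEMMAS AND PROOFS =====

-- numeral normalisation for A's let-bound constants
lemma n26 : (122:Int) + 1 - 97 = 26 := by norm_num

-- B depends on N only through N % 26
lemma alt_congr (N M : Int) (h : N % 26 = M % 26) :
    mover_abecedario_alt N = mover_abecedario_alt M := by
  unfold mover_abecedario_alt
  refine congrArg String.ofList (List.map_congr_left ?_)
  intro i _
  rw [PySem.Int.mod_eq_emod_of_pos (by norm_num : (0:Int) < 26),
      PySem.Int.mod_eq_emod_of_pos (by norm_num : (0:Int) < 26),
      Int.add_emod, h, ← Int.add_emod]

-- A on a nonnegative input equals A at N % 26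
lemma A_shift_pos (N : Int) (h : N ≥ 0) :
    mover_abecedario N = mover_abecedario (PySem.Int.mod N 26) := by
  have h0 : PySem.Int.mod N 26 ≥ 0 := PySem.Int.mod_nonneg N (by norm_num)
  have h1 : PySem.Int.mod N 26 < 26 := PySem.Int.mod_lt N (by norm_num)
  have hid : PySem.Int.mod (PySem.Int.mod N 26) 26 = PySem.Int.mod N 26 := by
    rw [PySem.Int.mod_eq_emod_of_pos (by norm_num : (0:Int) < 26)]
    exact Int.emod_eq_of_lt h0 h1
  unfold mover_abecedario
  simp only [n26, if_pos h, if_pos h0, hid]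

-- A on a negative input equals A at N % -26 (which lies in (-26, 0])
lemma A_shift_neg (N : Int) (h : ¬ N ≥ 0) :
    mover_abecedario N = mover_abecedario (PySem.Int.mod N (-26)) := by
  obtain ⟨hlo, hhi⟩ := PySem.Int.mod_neg_bounds N (b := -26) (by norm_num)
  by_cases hz : PySem.Int.mod N (-26) = 0
  · unfold mover_abecedario
    simp only [n26, if_neg h, hz]
    decide
  · have hrneg : ¬ PySem.Int.mod N (-26) ≥ 0 := by omega
    have hid : PySem.Int.mod (PySem.Int.mod N (-26)) (-26) = PySem.Int.mod N (-26) := by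
      obtain ⟨hlo2, hhi2⟩ := PySem.Int.mod_neg_bounds (PySem.Int.mod N (-26)) (b := -26) (by norm_num)
      have heq := PySem.Int.floordiv_mul_add_mod (PySem.Int.mod N (-26)) (-26)
      have hd : PySem.Int.floordiv (PySem.Int.mod N (-26)) (-26) = 0 := by nlinarith
      omega
    unfold mover_abecedario
    simp only [n26, if_neg h, if_neg hrneg, hid]

-- N % -26 is congruent to N modulo 26
lemma mod_neg_emod (N : Int) : PySem.Int.mod N (-26) % 26 = N % 26 := by
  have heq := PySem.Int.floordiv_mul_add_mod N (-26)
  omega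

-- the finite check: A = B on every residue in (-26, 26)
lemma AB_small (m : Int) (hlo : -26 < m) (hhi : m < 26) :
    mover_abecedario m = mover_abecedario_alt m := by
  interval_cases m <;> decide

-- ===== VERDICT (by name: the statement is the Claim_ definition above) =====
theorem mover_abecedario_spec : Claim_equal_mover_abecedario := by
  intro N _
  unfold Spec_mover_abecedario
  by_cases h : N ≥ 0
  · have h1 : PySem.Int.mod N 26 < 26 := PySem.Int.mod_lt N (by norm_num)
    have h0 : PySem.Int.mod N 26 ≥ 0 := PySem.Int.mod_nonneg N (by norm_num)
    rw [A_shift_pos N h, AB_small _ (by omega) h1]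
    exact alt_congr _ _ (by rw [PySem.Int.mod_eq_emod_of_pos (by norm_num : (0:Int) < 26)]; omega)
  · obtain ⟨hlo, hhi⟩ := PySem.Int.mod_neg_bounds N (b := -26) (by norm_num)
    rw [A_shift_neg N h, AB_small _ (by omega) (by omega)]
    exact alt_congr _ _ (mod_neg_emod N)
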